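-- pv_equiv track=rewrite | github.com/mishrakanha1201-debug/MutualFundChatbot | backend/rag/query_classifier.py | is_general_finance_question
-- ===== SOURCE A (Python) =====
-- def is_general_finance_question(query: str) -> bool:
--     """
--     Check if query is a general finance/education question (NOT about specific funds)
--
--     Args:
--         query: User query
--
--     Returns:
--         True if it's a general finance question (no specific fund mentioned)
--     """
--     query_lower = query.lower()
--
--     # If query mentions a specific fund, it's NOT a general question
--     fund_indicators = [
--         'hdfc', 'elss', 'flexi cap', 'large and mid cap',
--         'fund name', 'scheme', 'specific fund'
--     ]
--     if any(indicator in query_lower for indicator in fund_indicators):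
--         return False  # This is about a specific fund, use scraped data
--
--     # Patterns that indicate general finance questions (without specific funds)
--     general_patterns = [
--         'what is', 'what are', 'what does', 'what do',
--         'explain', 'define', 'definition', 'meaning',
--         'how does', 'how do', 'how is', 'how are',
--         'tell me about', 'can you explain', 'can you tell me'
--     ]
--
--     # Check if query starts with general question patterns
--     for pattern in general_patterns:
--         if query_lower.startswith(pattern) or pattern in query_lower:
--             # Check if it's about finance/mutual funds (but NOT a specific fund)
--             finance_terms = [
--                 'mutual fund', 'expense ratio', 'exit load', 'sip',
--                 'nav', 'aum', 'benchmark', 'riskometer', 'lock-in',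
--                 'direct plan', 'regular plan', 'equity', 'debt',
--                 'fund', 'investment', 'investing', 'portfolio',
--                 'amc', 'sebi', 'amfi', 'elss', 'tax saver'
--             ]
--             if any(term in query_lower for term in finance_terms):
--                 # Double-check: if it mentions a fund name, it's not general
--                 if not any(fund_ind in query_lower for fund_ind in fund_indicators):
--                     return True
--
--     return False
-- ===== SOURCE B (Python) =====
-- FUND_INDICATORS = [
--     'hdfc', 'elss', 'flexi cap', 'large and mid cap',
--     'fund name', 'scheme', 'specific fund'
-- ]
-- GENERAL_PATTERNS = [
--     'what is', 'what are', 'what does', 'what do',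
--     'explain', 'define', 'definition', 'meaning',
--     'how does', 'how do', 'how is', 'how are',
--     'tell me about', 'can you explain', 'can you tell me'
-- ]
-- FINANCE_TERMS = [
--     'mutual fund', 'expense ratio', 'exit load', 'sip',
--     'nav', 'aum', 'benchmark', 'riskometer', 'lock-in',
--     'direct plan', 'regular plan', 'equity', 'debt',
--     'fund', 'investment', 'investing', 'portfolio',
--     'amc', 'sebi', 'amfi', 'elss', 'tax saver'
-- ]
--
-- def _buckets(kws):
--     # index the keywords by their first character
--     b = {}
--     for kw in kws:
--         b.setdefault(kw[0], []).append(kw)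
--     return b
--
-- FUND_BUCKETS = _buckets(FUND_INDICATORS)
-- PATTERN_BUCKETS = _buckets(GENERAL_PATTERNS)
-- FINANCE_BUCKETS = _buckets(FINANCE_TERMS)
--
-- def is_general_finance_question(query: str) -> bool:
--     # Single left-to-right sweep over the query's positions: at each position only
--     # the keywords whose first character matches q[i] (via the precomputed bucket
--     # index) are prefix-tested; a fund indicator bails out immediately, pattern and
--     # finance hits set accumulator flags that decide the answer at the end.
--     q = query.lower()
--     has_pattern = False
--     has_finance = False
--     for i in range(len(q)):
--         c = q[i]
--         for kw in FUND_BUCKETS.get(c, []):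
--             if q.startswith(kw, i):
--                 return False
--         if not has_pattern:
--             for kw in PATTERN_BUCKETS.get(c, []):
--                 if q.startswith(kw, i):
--                     has_pattern = True
--                     break
--         if not has_finance:
--             for kw in FINANCE_BUCKETS.get(c, []):
--                 if q.startswith(kw, i):
--                     has_finance = True
--                     break
--     return has_pattern and has_finance
-- ===== Notes on version B (the rewrite author's own statement) =====
-- stated objective: alternative
-- what changed: A runs a separate whole-query substring search for every keyword inside a nested pattern loop with redundant re-checks; B precomputes a first-character bucket index of the three keyword lists and makes one left-to-right sweep over the query's positions, prefix-testing only the bucket of keywords starting with the current character, returning False immediately on a fund indicator and accumulating pattern/finance flags decided at the end.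
import Mathlib
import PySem

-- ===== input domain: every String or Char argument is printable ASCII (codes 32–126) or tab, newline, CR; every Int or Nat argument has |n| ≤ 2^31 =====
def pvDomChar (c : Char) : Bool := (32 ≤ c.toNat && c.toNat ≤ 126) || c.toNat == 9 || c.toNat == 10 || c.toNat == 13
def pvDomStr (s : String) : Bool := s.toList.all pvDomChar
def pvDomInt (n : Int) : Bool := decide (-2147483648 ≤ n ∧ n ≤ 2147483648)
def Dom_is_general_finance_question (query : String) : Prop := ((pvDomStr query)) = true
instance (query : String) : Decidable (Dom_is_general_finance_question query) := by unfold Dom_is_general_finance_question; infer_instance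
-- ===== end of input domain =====

-- B replaces A's per-keyword substring searches (nested pattern loop with redundant re-checks) by one left-to-right sweep over the query's positions with prefix tests and accumulator flags (objective: alternative).


-- ===== PORT A =====
def pvFundIndicators : List String :=
  ["hdfc", "elss", "flexi cap", "large and mid cap", "fund name", "scheme", "specific fund"]

def pvGeneralPatterns : List String :=
  ["what is", "what are", "what does", "what do",
   "explain", "define", "definition", "meaning",
   "how does", "how do", "how is", "how are",
   "tell me about", "can you explain", "can you tell me"]

def pvFinanceTerms : List String :=
  ["mutual fund", "expense ratio", "exit load", "sip",
   "nav", "aum", "benchmark", "riskometer", "lock-in",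
   "direct plan", "regular plan", "equity", "debt",
   "fund", "investment", "investing", "portfolio",
   "amc", "sebi", "amfi", "elss", "tax saver"]

def is_general_finance_question (query : String) : Bool :=
  let query_lower := PySem.Str.lower query
  if pvFundIndicators.any (fun ind => PySem.Str.isIn ind query_lower) then
    false
  else
    -- the for-loop with early `return True`: true iff some pattern passes all three inner checks
    pvGeneralPatterns.any (fun pattern =>
      (PySem.Str.startswith query_lower pattern || PySem.Str.isIn pattern query_lower) &&
      pvFinanceTerms.any (fun term => PySem.Str.isIn term query_lower) &&
      !(pvFundIndicators.any (fun ind => PySem.Str.isIn ind query_lower)))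

-- ===== PORT B =====
-- B's bucket index: _buckets(kws) builds a dict from first character to the keywords
-- starting with it (setdefault+append = insert of getD-extended list; kw[0] is total
-- here since every keyword literal is nonempty, ported as headD ' ').
def pvBuckets (kws : List String) : PySem.Dict Char (List String) :=
  kws.foldl (fun b kw =>
    PySem.Dict.insert b (kw.toList.headD ' ') (PySem.Dict.getD b (kw.toList.headD ' ') [] ++ [kw]))
    PySem.Dict.empty

def pvFundBuckets : PySem.Dict Char (List String) := pvBuckets pvFundIndicators
def pvPatternBuckets : PySem.Dict Char (List String) := pvBuckets pvGeneralPatterns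
def pvFinanceBuckets : PySem.Dict Char (List String) := pvBuckets pvFinanceTerms

-- B's position sweep: the `for i in range(len(q))` loop over start positions becomes
-- structural recursion over the suffixes of q's character list (q.startswith(kw, i)
-- is a prefix test on the i-th suffix), carrying the two accumulator flags; the
-- guarded inner loops with break are `if flag then true else bucket.any`.
def pvSweep : List Char → Bool → Bool → Bool
  | [], has_pattern, has_finance => has_pattern && has_finance
  | c :: rest, has_pattern, has_finance =>
    if (PySem.Dict.getD pvFundBuckets c []).any (fun kw => kw.toList.isPrefixOf (c :: rest)) then
      false
    else
      pvSweep rest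
        (if has_pattern then true
         else (PySem.Dict.getD pvPatternBuckets c []).any (fun kw => kw.toList.isPrefixOf (c :: rest)))
        (if has_finance then true
         else (PySem.Dict.getD pvFinanceBuckets c []).any (fun kw => kw.toList.isPrefixOf (c :: rest)))

def is_general_finance_question_alt (query : String) : Bool :=
  pvSweep (PySem.Str.lower query).toList false false

-- ===== PRECONDITION & SPEC =====
def Spec_is_general_finance_question (query : String) (out : Bool) : Prop := out = is_general_finance_question_alt query
instance (query : String) (out : Bool) : Decidable (Spec_is_general_finance_question query out) := by unfold Spec_is_general_finance_question; infer_instance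

-- ===== CLAIM =====
def Claim_equal_is_general_finance_question : Prop := ∀ (query : String), Dom_is_general_finance_question query → Spec_is_general_finance_question query (is_general_finance_question query)

-- ===== LEMMAS AND PROOFS =====

-- boolean infix occurrence of any keyword of a list
def pvOcc (kws : List String) (s : List Char) : Bool :=
  kws.any (fun kw => decide (kw.toList <:+: s))

theorem pvOcc_nil (kws : List String) (h : ∀ kw ∈ kws, kw.toList ≠ []) :
    pvOcc kws [] = false := by
  simp only [pvOcc, List.any_eq_false]
  intro kw hkw
  simp [List.infix_nil, h kw hkw]

theorem pv_any_or {α : Type} (xs : List α) (f g : α → Bool) :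
    xs.any (fun x => f x || g x) = (xs.any f || xs.any g) := by
  induction xs with
  | nil => simp
  | cons a t ih => simp [List.any_cons, ih, Bool.or_assoc, Bool.or_left_comm]

theorem pvOcc_cons (kws : List String) (c : List Char) (a : Char) :
    pvOcc kws (a :: c) =
      (kws.any (fun kw => kw.toList.isPrefixOf (a :: c)) || pvOcc kws c) := by
  simp only [pvOcc]
  rw [← pv_any_or]
  refine List.any_congr rfl ?_
  intro kw
  rw [Bool.eq_iff_iff]
  simp [List.infix_cons_iff, List.isPrefixOf_iff_prefix]

-- the invariant of B's sweep
-- the fold-built bucket dict looked up at c is the in-order sublist of keywords starting with c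
theorem pvBuckets_getD (kws : List String) (c : Char) :
    PySem.Dict.getD (pvBuckets kws) c [] = kws.filter (fun kw => kw.toList.headD ' ' == c) := by
  have key : ∀ (d : PySem.Dict Char (List String)),
      PySem.Dict.getD (kws.foldl (fun b kw => PySem.Dict.insert b (kw.toList.headD ' ')
          (PySem.Dict.getD b (kw.toList.headD ' ') [] ++ [kw])) d) c []
        = PySem.Dict.getD d c [] ++ kws.filter (fun kw => kw.toList.headD ' ' == c) := by
    induction kws with
    | nil => intro d; simp
    | cons kw t ih =>
      intro d
      rw [List.foldl_cons, ih, List.filter_cons]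
      by_cases h : kw.toList.head?.getD ' ' = c
      · rw [PySem.Dict.getD_insert]
        simp [h]
      · rw [PySem.Dict.getD_insert]
        simp [h, Ne.symm h]
  rw [pvBuckets, key]
  simp [PySem.Dict.getD, PySem.Dict.get?, PySem.Dict.empty]

-- prefix-testing only the keywords that start with c loses nothing at a suffix c :: rest
theorem pv_bucket_any (kws : List String) (h : ∀ kw ∈ kws, kw.toList ≠ []) (c : Char) (rest : List Char) :
    (PySem.Dict.getD (pvBuckets kws) c []).any (fun kw => kw.toList.isPrefixOf (c :: rest))
      = kws.any (fun kw => kw.toList.isPrefixOf (c :: rest)) := by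
  rw [pvBuckets_getD, Bool.eq_iff_iff]
  simp only [List.any_eq_true, List.mem_filter]
  constructor
  · rintro ⟨kw, ⟨hm, _⟩, hpf⟩
    exact ⟨kw, hm, hpf⟩
  · rintro ⟨kw, hm, hpf⟩
    refine ⟨kw, ⟨hm, ?_⟩, hpf⟩
    obtain ⟨x, xs, hx⟩ := List.exists_cons_of_ne_nil (h kw hm)
    have hp : kw.toList <+: c :: rest := List.isPrefixOf_iff_prefix.mp hpf
    obtain ⟨tl, htl⟩ := hp
    rw [hx, List.cons_append] at htl
    have hxc : x = c := (List.cons.injEq _ _ _ _ ▸ htl).1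
    simp [hx, hxc]

theorem pvSweep_eq (s : List Char) (hp hf : Bool) :
    pvSweep s hp hf =
      (!(pvOcc pvFundIndicators s) &&
        ((hp || pvOcc pvGeneralPatterns s) && (hf || pvOcc pvFinanceTerms s))) := by
  induction s generalizing hp hf with
  | nil =>
    rw [pvSweep, pvOcc_nil pvFundIndicators (by decide),
        pvOcc_nil pvGeneralPatterns (by decide), pvOcc_nil pvFinanceTerms (by decide)]
    simp
  | cons a t ih =>
    rw [pvSweep]
    simp only [pvFundBuckets, pvPatternBuckets, pvFinanceBuckets,
      pv_bucket_any pvFundIndicators (by decide) a t,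
      pv_bucket_any pvGeneralPatterns (by decide) a t,
      pv_bucket_any pvFinanceTerms (by decide) a t]
    rw [pvOcc_cons, pvOcc_cons, pvOcc_cons]
    by_cases h : pvFundIndicators.any (fun kw => kw.toList.isPrefixOf (a :: t)) = true
    · rw [if_pos h, h]
      simp
    · have h' : pvFundIndicators.any (fun kw => kw.toList.isPrefixOf (a :: t)) = false :=
        Bool.eq_false_iff.mpr h
      rw [if_neg h, ih, h']
      cases hp <;> cases hf <;> simp

theorem pvOcc_eq_isIn (kws : List String) (q : String) :
    pvOcc kws q.toList = kws.any (fun kw => PySem.Str.isIn kw q) := by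
  refine List.any_congr rfl ?_
  intro kw
  rw [Bool.eq_iff_iff, decide_eq_true_iff, ← PySem.Str.isIn_iff_infix]

-- a prefix occurrence is an occurrence: startswith implies `in`
theorem pv_sw_or_isIn (s p : String) :
    (PySem.Str.startswith s p || PySem.Str.isIn p s) = PySem.Str.isIn p s := by
  cases h : PySem.Str.startswith s p
  · rw [Bool.false_or]
  · rw [Bool.true_or]
    symm
    rw [PySem.Str.isIn_iff_infix]
    have := (PySem.Chars.startswith_iff s.toList p.toList).mp (by simpa using h)
    exact this.isInfix

-- constant conjunct distributes out of List.any
theorem pv_any_and_const {α : Type} (xs : List α) (f : α → Bool) (c : Bool) :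
    xs.any (fun x => f x && c) = (xs.any f && c) := by
  induction xs with
  | nil => simp
  | cons a t ih => simp [List.any_cons, ih, Bool.and_or_distrib_right]

-- ===== VERDICT =====
theorem is_general_finance_question_spec : Claim_equal_is_general_finance_question := by
  intro query _
  unfold Spec_is_general_finance_question is_general_finance_question is_general_finance_question_alt
  dsimp only
  rw [pvSweep_eq, pvOcc_eq_isIn, pvOcc_eq_isIn, pvOcc_eq_isIn]
  by_cases h : pvFundIndicators.any (fun ind => PySem.Str.isIn ind (PySem.Str.lower query)) = true
  · rw [if_pos h, h]
    simp
  · have h' : pvFundIndicators.any (fun ind => PySem.Str.isIn ind (PySem.Str.lower query)) = false :=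
      Bool.eq_false_iff.mpr h
    rw [if_neg h, h']
    simp only [Bool.not_false, Bool.and_true, Bool.true_and, Bool.false_or, pv_sw_or_isIn]
    exact pv_any_and_const _ _ _
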